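-- pv_equiv track=rewrite | github.com/MrBrantCode/unitest_baseline | mut_generate/mist_train_taco/taco_18949/solution.py | process_permutation
-- ===== SOURCE A (Python) =====
-- def process_permutation(N, Q, A, queries):
--     if N == 1:
--         return A
--
--     L = [0] * (N + 1)
--     R = [0] * (N + 1)
--
--     for i in range(N - 1):
--         R[A[i]] = A[i + 1]
--         L[A[i + 1]] = A[i]
--
--     lm = A[0]
--     rm = A[-1]
--
--     for q in queries:
--         if q == rm:
--             l = L[q]
--             R[l] = 0
--             L[q] = 0
--             R[q] = lm
--             L[lm] = q
--             lm = q
--             rm = l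
--         elif q == lm:
--             r = R[q]
--             L[r] = 0
--             R[q] = 0
--             L[q] = rm
--             R[rm] = q
--             lm = r
--             rm = q
--         else:
--             (l, r) = (L[q], R[q])
--             L[q] = rm
--             R[q] = lm
--             R[l] = 0
--             L[r] = 0
--             L[lm] = q
--             R[rm] = q
--             rm = l
--             lm = r
--
--     ans = []
--     while lm != 0:
--         ans.append(lm)
--         lm = R[lm]
--
--     return ans
-- ===== SOURCE B (Python) =====
-- def process_permutation(N, Q, A, queries):
--     if N == 1:
--         return A
--     lst = list(A)
--     for q in queries:
--         i = lst.index(q)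
--         lst = lst[i + 1:] + [lst[i]] + lst[:i]
--     return lst
-- ===== Notes on version B (the rewrite author's own statement) =====
-- stated objective: simpler
-- what changed: A simulates the process with doubly-linked-list arrays L/R plus head/tail pointers and a final pointer walk; B keeps the permutation as a plain list and, for each query q at position i, rebuilds it as lst[i+1:] + [q] + lst[:i]. Pre_ excludes inputs outside A's natural domain (duplicates, wrong-length or out-of-range values, unknown queries), where A raises, loops or walks garbage pointers.
-- outside the precondition, e.g. on process_permutation(4, 2, [1, 4, 1, 2], [1, 2]): A returns [1, 2], B returns [1, 2, 4, 1]; on process_permutation(2, 1, [5, 6], [5]): A raises IndexError, B returns [6, 5]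
import Mathlib
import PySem

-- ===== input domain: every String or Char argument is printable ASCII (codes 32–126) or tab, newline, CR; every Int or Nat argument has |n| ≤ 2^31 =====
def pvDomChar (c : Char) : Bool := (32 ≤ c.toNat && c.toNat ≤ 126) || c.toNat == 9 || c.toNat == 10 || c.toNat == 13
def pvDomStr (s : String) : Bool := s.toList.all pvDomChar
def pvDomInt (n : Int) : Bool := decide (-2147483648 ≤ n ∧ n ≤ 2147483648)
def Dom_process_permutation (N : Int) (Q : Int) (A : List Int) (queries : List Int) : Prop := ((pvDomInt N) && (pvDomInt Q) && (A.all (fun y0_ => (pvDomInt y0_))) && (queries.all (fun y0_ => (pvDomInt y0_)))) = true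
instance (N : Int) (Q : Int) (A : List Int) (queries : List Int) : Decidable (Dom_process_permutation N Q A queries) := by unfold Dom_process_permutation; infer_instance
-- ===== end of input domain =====

-- B replaces A's doubly-linked-list pointer surgery by rebuilding a plain list per query
-- (lst[i+1:] + [q] + lst[:i]); simpler code, same return value on Pre_ (neither mutates its arguments).

-- ===== PORT A =====
-- array read/write L[i] / L[i]=v; exact for 0 ≤ i < len, which Pre_ guarantees for every index A uses
def aget (xs : List Int) (i : Int) : Int := xs.getD i.toNat 0
def aset (xs : List Int) (i : Int) (v : Int) : List Int := xs.set i.toNat v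

-- body of 'for i in range(N - 1): R[A[i]] = A[i+1]; L[A[i+1]] = A[i]' (state = (L, R))
def buildStep (A : List Int) (s : List Int × List Int) (i : Int) : List Int × List Int :=
  (aset s.1 (PySem.List.pyGetD A (i + 1) 0) (PySem.List.pyGetD A i 0),
   aset s.2 (PySem.List.pyGetD A i 0) (PySem.List.pyGetD A (i + 1) 0))

-- body of 'for q in queries' (state = ((L, R), lm, rm)); branches and update order as in A
def qstep (s : (List Int × List Int) × Int × Int) (q : Int) : (List Int × List Int) × Int × Int :=
  let L := s.1.1; let R := s.1.2; let lm := s.2.1; let rm := s.2.2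
  if q = rm then
    let l := aget L q
    ((aset (aset L q 0) lm q, aset (aset R l 0) q lm), q, l)
  else if q = lm then
    let r := aget R q
    ((aset (aset L r 0) q rm, aset (aset R q 0) rm q), r, q)
  else
    let l := aget L q
    let r := aget R q
    ((aset (aset (aset L q rm) r 0) lm q, aset (aset (aset R q lm) l 0) rm q), r, l)

-- 'while lm != 0: ans.append(lm); lm = R[lm]' — the Python loop terminates because R encodes
-- an acyclic chain of the distinct values 1..N; under Pre_ the chain has N < R.length = N+1
-- elements, so fuel R.length is exact
def readout : Nat → List Int → Int → List Int
  | 0, _, _ => []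
  | fuel + 1, R, lm => if lm = 0 then [] else lm :: readout fuel R (aget R lm)

def process_permutation (N : Int) (Q : Int) (A : List Int) (queries : List Int) : List Int :=
  if N = 1 then A
  else
    let L0 : List Int := List.replicate (N + 1).toNat 0
    let R0 : List Int := List.replicate (N + 1).toNat 0
    let s0 := (PySem.List.pyRange 0 (N - 1) 1).foldl (buildStep A) (L0, R0)
    let lm0 := PySem.List.pyGetD A 0 0
    let rm0 := PySem.List.pyGetD A (-1) 0
    let s := queries.foldl qstep ((s0.1, s0.2), lm0, rm0)
    readout s.1.2.length s.1.2 s.2.1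

-- ===== PORT B =====
-- lst = lst[i+1:] + [lst[i]] + lst[:i] where i = lst.index(q); Python raises ValueError when
-- q ∉ lst (outside Pre_), so the none branch is unreachable on Pre_
def rotStep (lst : List Int) (q : Int) : List Int :=
  match PySem.List.index? lst q with
  | some i =>
      PySem.List.slice lst (some ((i : Int) + 1)) none
        ++ [PySem.List.pyGetD lst (i : Int) 0]
        ++ PySem.List.slice lst none (some (i : Int))
  | none => lst

def process_permutation_alt (N : Int) (Q : Int) (A : List Int) (queries : List Int) : List Int :=
  if N = 1 then A else queries.foldl rotStep A

-- ===== PRECONDITION & SPEC =====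
-- Pre_ is A's natural domain: either the N == 1 early return, or N = len(A) ≥ 2 with A holding
-- distinct values in 1..N (A treats them as linked-list node indices of L/R, size N+1) and every
-- query one of those values; anywhere else A raises (IndexError / wrong-size tables) or walks
-- garbage pointers.
def Pre_process_permutation (N : Int) (Q : Int) (A : List Int) (queries : List Int) : Prop :=
  N = 1 ∨ (2 ≤ N ∧ (A.length : Int) = N ∧ A.Nodup ∧ (∀ v ∈ A, 1 ≤ v ∧ v ≤ N) ∧ ∀ q ∈ queries, q ∈ A)
instance (N : Int) (Q : Int) (A : List Int) (queries : List Int) : Decidable (Pre_process_permutation N Q A queries) := by unfold Pre_process_permutation; infer_instance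

def pvWitness_process_permutation : Int × Int × List Int × List Int := (4, 2, [2, 4, 1, 3], [1, 3])

def Spec_process_permutation (N : Int) (Q : Int) (A : List Int) (queries : List Int) (out : List Int) : Prop := out = process_permutation_alt N Q A queries
instance (N : Int) (Q : Int) (A : List Int) (queries : List Int) (out : List Int) : Decidable (Spec_process_permutation N Q A queries out) := by unfold Spec_process_permutation; infer_instance

-- ===== CLAIM (what is proved, stated in full; the proofs are below) =====
def Claim_equal_process_permutation : Prop := ∀ (N : Int) (Q : Int) (A : List Int) (queries : List Int), Dom_process_permutation N Q A queries → Pre_process_permutation N Q A queries → Spec_process_permutation N Q A queries (process_permutation N Q A queries)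

-- ===== LEMMAS AND PROOFS =====

-- successor-in-list function: nextOf lst v = element after the first occurrence of v (0 if last/absent)
def nextOf : List Int → Int → Int
  | [], _ => 0
  | a :: t, v => if v = a then t.headD 0 else nextOf t v

-- "the array R stores the successor pointers of lst"
def ptrOk (R : List Int) (lst : List Int) : Prop := ∀ v ∈ lst, aget R v = nextOf lst v

theorem headD_rev (l : List Int) : l.reverse.headD 0 = l.getLastD 0 := by
  rw [List.headD_eq_head?, List.head?_reverse, List.getLastD_eq_getLast?]

theorem getLastD_rev (l : List Int) : l.reverse.getLastD 0 = l.headD 0 := by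
  have h := headD_rev l.reverse
  rw [List.reverse_reverse] at h
  exact h.symm

theorem headD_append_left (X Y : List Int) (h : X ≠ []) : (X ++ Y).headD 0 = X.headD 0 := by
  cases X with
  | nil => exact absurd rfl h
  | cons a t => rfl

theorem getLastD_append_right (X Y : List Int) (h : Y ≠ []) : (X ++ Y).getLastD 0 = Y.getLastD 0 := by
  rw [← headD_rev, List.reverse_append,
    headD_append_left _ _ (by simpa using h), headD_rev]

theorem headD_mem (l : List Int) (h : l ≠ []) : l.headD 0 ∈ l := by
  cases l with
  | nil => exact absurd rfl h
  | cons a t => simp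

theorem getLastD_mem (l : List Int) (h : l ≠ []) : l.getLastD 0 ∈ l := by
  rw [List.getLastD_eq_getLast?, List.getLast?_eq_some_getLast h]
  exact List.getLast_mem h

theorem nextOf_append_right (X Y : List Int) (v : Int) (h : v ∉ X) : nextOf (X ++ Y) v = nextOf Y v := by
  induction X with
  | nil => simp
  | cons a t ih =>
    simp only [List.mem_cons, not_or] at h
    simp only [List.cons_append, nextOf, if_neg (by exact fun e => h.1 e)]
    exact ih h.2

theorem nextOf_decomp (U W : List Int) (v : Int) (h : v ∉ U) : nextOf (U ++ v :: W) v = W.headD 0 := by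
  rw [nextOf_append_right _ _ _ h]
  simp [nextOf]

theorem length_aset (xs : List Int) (i v : Int) : (aset xs i v).length = xs.length := by
  simp [aset]

theorem aget_aset_self (xs : List Int) (i v : Int) (h0 : 0 ≤ i) (h : i.toNat < xs.length) :
    aget (aset xs i v) i = v := by
  simp [aget, aset, List.getD, h]

theorem aget_aset_ne (xs : List Int) (i j v : Int) (h0 : 0 ≤ i) (h1 : 0 ≤ j) (hne : j ≠ i) :
    aget (aset xs i v) j = aget xs j := by
  have hn : i.toNat ≠ j.toNat := by omega
  simp [aget, aset, List.getD, List.getElem?_set_ne hn]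

theorem step_G3 (R P S : List Int) (q : Int) (hP : P ≠ []) (hS : S ≠ [])
    (hnd : (P ++ q :: S).Nodup)
    (hrng : ∀ v ∈ P ++ q :: S, 1 ≤ v ∧ v.toNat < R.length)
    (hR : ptrOk R (P ++ q :: S)) :
    ptrOk (aset (aset (aset R q (P.headD 0)) (P.getLastD 0) 0) (S.getLastD 0) q) (S ++ q :: P) := by
  have hdisj : ∀ a ∈ P, a ∉ q :: S := fun a ha => (List.disjoint_of_nodup_append hnd) ha
  have hqSnd : (q :: S).Nodup := hnd.of_append_right
  have hqS : q ∉ S := (List.nodup_cons.mp hqSnd).1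
  have hSnd : S.Nodup := (List.nodup_cons.mp hqSnd).2
  have hPnd : P.Nodup := hnd.of_append_left
  have hqP : q ∉ P := fun h => hdisj q h (List.mem_cons_self)
  have hq1 : 1 ≤ q ∧ q.toNat < R.length := hrng q (List.mem_append.mpr (Or.inr List.mem_cons_self))
  have hlastP : P.getLastD 0 ∈ P := getLastD_mem P hP
  have hlastS : S.getLastD 0 ∈ S := getLastD_mem S hS
  have hlastP1 : 1 ≤ P.getLastD 0 := (hrng _ (List.mem_append.mpr (Or.inl hlastP))).1
  have hlastS1 : 1 ≤ S.getLastD 0 :=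
    (hrng _ (List.mem_append.mpr (Or.inr (List.mem_cons_of_mem _ hlastS)))).1
  intro v hv
  rcases List.mem_append.mp hv with hvS | hvqP
  · -- v comes from S
    have hv1 : 1 ≤ v ∧ v.toNat < R.length :=
      hrng v (List.mem_append.mpr (Or.inr (List.mem_cons_of_mem _ hvS)))
    have hvP : v ∉ P := fun h => hdisj v h (List.mem_cons_of_mem _ hvS)
    have hvq : v ≠ q := fun e => hqS (e ▸ hvS)
    obtain ⟨S1, S2, rfl⟩ := List.append_of_mem hvS
    have hvS1 : v ∉ S1 := fun h => (List.disjoint_of_nodup_append hSnd) h List.mem_cons_self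
    cases S2 with
    | nil =>
      have hlast : (S1 ++ [v]).getLastD 0 = v := by
        rw [getLastD_append_right _ _ (by simp)]; rfl
      rw [hlast, aget_aset_self _ _ _ (by omega) (by simp only [length_aset]; exact hv1.2)]
      have e2 : (S1 ++ [v]) ++ q :: P = S1 ++ v :: (q :: P) := by simp
      rw [e2, nextOf_decomp _ _ _ hvS1]
      rfl
    | cons w S2' =>
      have hvW : v ∉ w :: S2' := (List.nodup_cons.mp hSnd.of_append_right).1
      have hlast : (S1 ++ v :: w :: S2').getLastD 0 = (w :: S2').getLastD 0 := by
        have e : S1 ++ v :: w :: S2' = (S1 ++ [v]) ++ w :: S2' := by simp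
        rw [e, getLastD_append_right _ _ (by simp)]
      have hvne_lastS : v ≠ (S1 ++ v :: w :: S2').getLastD 0 := by
        rw [hlast]
        exact fun e => hvW (e ▸ getLastD_mem _ (by simp))
      have hvne_lastP : v ≠ P.getLastD 0 := fun e => hvP (e ▸ hlastP)
      rw [aget_aset_ne _ _ _ _ (by omega) (by omega) hvne_lastS,
          aget_aset_ne _ _ _ _ (by omega) (by omega) hvne_lastP,
          aget_aset_ne _ _ _ _ (by omega) (by omega) hvq]
      have hold := hR v (List.mem_append.mpr (Or.inr (List.mem_cons_of_mem _ hvS)))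
      have e1 : P ++ q :: (S1 ++ v :: w :: S2') = (P ++ q :: S1) ++ v :: (w :: S2') := by simp
      have hvPqS1 : v ∉ P ++ q :: S1 := by
        simp only [List.mem_append, List.mem_cons]
        rintro (h | h | h)
        exacts [hvP h, hvq h, hvS1 h]
      rw [e1, nextOf_decomp _ _ _ hvPqS1] at hold
      rw [hold]
      have e2 : (S1 ++ v :: w :: S2') ++ q :: P = S1 ++ v :: (w :: (S2' ++ q :: P)) := by simp
      rw [e2, nextOf_decomp _ _ _ hvS1]
      rfl
  · rcases List.mem_cons.mp hvqP with rfl | hvP2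
    · -- v = q
      have hqlastS : v ≠ S.getLastD 0 := fun e => hqS (e ▸ hlastS)
      have hqlastP : v ≠ P.getLastD 0 := fun e => hqP (e ▸ hlastP)
      rw [aget_aset_ne _ _ _ _ (by omega) (by omega) hqlastS,
          aget_aset_ne _ _ _ _ (by omega) (by omega) hqlastP,
          aget_aset_self _ _ _ (by omega) hq1.2]
      rw [nextOf_decomp _ _ _ hqS]
    · -- v ∈ P
      have hv1 : 1 ≤ v ∧ v.toNat < R.length := hrng v (List.mem_append.mpr (Or.inl hvP2))
      have hvq : v ≠ q := fun e => hqP (e ▸ hvP2)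
      have hvS : v ∉ S := fun h => hdisj v hvP2 (List.mem_cons_of_mem _ h)
      have hvne_lastS : v ≠ S.getLastD 0 := fun e => hvS (e ▸ hlastS)
      obtain ⟨P1, P2, rfl⟩ := List.append_of_mem hvP2
      have hvP1 : v ∉ P1 := fun h => (List.disjoint_of_nodup_append hPnd) h List.mem_cons_self
      cases P2 with
      | nil =>
        have hlast : (P1 ++ [v]).getLastD 0 = v := by
          rw [getLastD_append_right _ _ (by simp)]; rfl
        rw [aget_aset_ne _ _ _ _ (by omega) (by omega) hvne_lastS, hlast,
            aget_aset_self _ _ _ (by omega) (by simp only [length_aset]; exact hv1.2)]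
        have e2 : S ++ q :: (P1 ++ [v]) = (S ++ q :: P1) ++ v :: [] := by simp [List.append_assoc]
        have hvSqP1 : v ∉ S ++ q :: P1 := by
          simp only [List.mem_append, List.mem_cons]
          rintro (h | h | h)
          exacts [hvS h, hvq h, hvP1 h]
        rw [e2, nextOf_decomp _ _ _ hvSqP1]
        rfl
      | cons w P2' =>
        have hvW : v ∉ w :: P2' := (List.nodup_cons.mp hPnd.of_append_right).1
        have hlast : (P1 ++ v :: w :: P2').getLastD 0 = (w :: P2').getLastD 0 := by
          have e : P1 ++ v :: w :: P2' = (P1 ++ [v]) ++ w :: P2' := by simp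
          rw [e, getLastD_append_right _ _ (by simp)]
        have hvne_lastP : v ≠ (P1 ++ v :: w :: P2').getLastD 0 := by
          rw [hlast]
          exact fun e => hvW (e ▸ getLastD_mem _ (by simp))
        rw [aget_aset_ne _ _ _ _ (by omega) (by omega) hvne_lastS,
            aget_aset_ne _ _ _ _ (by omega) (by omega) hvne_lastP,
            aget_aset_ne _ _ _ _ (by omega) (by omega) hvq]
        have hold := hR v (List.mem_append.mpr (Or.inl hvP2))
        have e1 : (P1 ++ v :: w :: P2') ++ q :: S = P1 ++ v :: (w :: (P2' ++ q :: S)) := by simp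
        rw [e1, nextOf_decomp _ _ _ hvP1] at hold
        rw [hold]
        have e2 : S ++ q :: (P1 ++ v :: w :: P2') = (S ++ q :: P1) ++ v :: (w :: P2') := by simp
        have hvSqP1 : v ∉ S ++ q :: P1 := by
          simp only [List.mem_append, List.mem_cons]
          rintro (h | h | h)
          exacts [hvS h, hvq h, hvP1 h]
        rw [e2, nextOf_decomp _ _ _ hvSqP1]
        rfl

theorem step_G1 (R P : List Int) (q : Int) (hP : P ≠ [])
    (hnd : (P ++ [q]).Nodup)
    (hrng : ∀ v ∈ P ++ [q], 1 ≤ v ∧ v.toNat < R.length)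
    (hR : ptrOk R (P ++ [q])) :
    ptrOk (aset (aset R (P.getLastD 0) 0) q (P.headD 0)) (q :: P) := by
  have hdisj : ∀ a ∈ P, a ∉ [q] := fun a ha => (List.disjoint_of_nodup_append hnd) ha
  have hPnd : P.Nodup := hnd.of_append_left
  have hqP : q ∉ P := fun h => hdisj q h (by simp)
  have hq1 : 1 ≤ q ∧ q.toNat < R.length := hrng q (List.mem_append.mpr (Or.inr (by simp)))
  have hlastP : P.getLastD 0 ∈ P := getLastD_mem P hP
  have hlastP1 : 1 ≤ P.getLastD 0 := (hrng _ (List.mem_append.mpr (Or.inl hlastP))).1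
  intro v hv
  rcases List.mem_cons.mp hv with rfl | hvP
  · -- v = q
    rw [aget_aset_self _ _ _ (by omega) (by simp only [length_aset]; exact hq1.2)]
    simp [nextOf]
  · have hv1 : 1 ≤ v ∧ v.toNat < R.length := hrng v (List.mem_append.mpr (Or.inl hvP))
    have hvq : v ≠ q := fun e => hqP (e ▸ hvP)
    obtain ⟨P1, P2, rfl⟩ := List.append_of_mem hvP
    have hvP1 : v ∉ P1 := fun h => (List.disjoint_of_nodup_append hPnd) h List.mem_cons_self
    have hnext : nextOf (q :: (P1 ++ v :: P2)) v = nextOf ((q :: P1) ++ v :: P2) v := by simp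
    cases P2 with
    | nil =>
      have hlast : (P1 ++ [v]).getLastD 0 = v := by
        rw [getLastD_append_right _ _ (by simp)]; rfl
      rw [aget_aset_ne _ _ _ _ (by omega) (by omega) hvq, hlast,
          aget_aset_self _ _ _ (by omega) hv1.2]
      have hvqP1 : v ∉ q :: P1 := by
        simp only [List.mem_cons]
        rintro (h | h)
        exacts [hvq h, hvP1 h]
      rw [hnext, nextOf_decomp _ _ _ hvqP1]
      rfl
    | cons w P2' =>
      have hvW : v ∉ w :: P2' := (List.nodup_cons.mp hPnd.of_append_right).1
      have hlast : (P1 ++ v :: w :: P2').getLastD 0 = (w :: P2').getLastD 0 := by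
        have e : P1 ++ v :: w :: P2' = (P1 ++ [v]) ++ w :: P2' := by simp
        rw [e, getLastD_append_right _ _ (by simp)]
      have hvlast : v ≠ (P1 ++ v :: w :: P2').getLastD 0 := by
        rw [hlast]
        exact fun e => hvW (e ▸ getLastD_mem _ (by simp))
      rw [aget_aset_ne _ _ _ _ (by omega) (by omega) hvq,
          aget_aset_ne _ _ _ _ (by omega) (by omega) hvlast]
      have hold := hR v (List.mem_append.mpr (Or.inl hvP))
      have e1 : (P1 ++ v :: w :: P2') ++ [q] = P1 ++ v :: (w :: (P2' ++ [q])) := by simp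
      rw [e1, nextOf_decomp _ _ _ hvP1] at hold
      rw [hold]
      have hvqP1 : v ∉ q :: P1 := by
        simp only [List.mem_cons]
        rintro (h | h)
        exacts [hvq h, hvP1 h]
      rw [hnext, nextOf_decomp _ _ _ hvqP1]
      rfl

theorem step_G2 (R S : List Int) (q : Int) (hS : S ≠ [])
    (hnd : (q :: S).Nodup)
    (hrng : ∀ v ∈ q :: S, 1 ≤ v ∧ v.toNat < R.length)
    (hR : ptrOk R (q :: S)) :
    ptrOk (aset (aset R q 0) (S.getLastD 0) q) (S ++ [q]) := by
  have hqS : q ∉ S := (List.nodup_cons.mp hnd).1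
  have hSnd : S.Nodup := (List.nodup_cons.mp hnd).2
  have hq1 : 1 ≤ q ∧ q.toNat < R.length := hrng q List.mem_cons_self
  have hlastS : S.getLastD 0 ∈ S := getLastD_mem S hS
  have hlastS1 : 1 ≤ S.getLastD 0 := (hrng _ (List.mem_cons_of_mem _ hlastS)).1
  intro v hv
  rcases List.mem_append.mp hv with hvS | hvq
  · have hv1 : 1 ≤ v ∧ v.toNat < R.length := hrng v (List.mem_cons_of_mem _ hvS)
    have hvq : v ≠ q := fun e => hqS (e ▸ hvS)
    obtain ⟨S1, S2, rfl⟩ := List.append_of_mem hvS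
    have hvS1 : v ∉ S1 := fun h => (List.disjoint_of_nodup_append hSnd) h List.mem_cons_self
    cases S2 with
    | nil =>
      have hlast : (S1 ++ [v]).getLastD 0 = v := by
        rw [getLastD_append_right _ _ (by simp)]; rfl
      rw [hlast, aget_aset_self _ _ _ (by omega) (by simp only [length_aset]; exact hv1.2)]
      have e2 : (S1 ++ [v]) ++ [q] = S1 ++ v :: [q] := by simp
      rw [e2, nextOf_decomp _ _ _ hvS1]
      rfl
    | cons w S2' =>
      have hvW : v ∉ w :: S2' := (List.nodup_cons.mp hSnd.of_append_right).1
      have hlast : (S1 ++ v :: w :: S2').getLastD 0 = (w :: S2').getLastD 0 := by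
        have e : S1 ++ v :: w :: S2' = (S1 ++ [v]) ++ w :: S2' := by simp
        rw [e, getLastD_append_right _ _ (by simp)]
      have hvlast : v ≠ (S1 ++ v :: w :: S2').getLastD 0 := by
        rw [hlast]
        exact fun e => hvW (e ▸ getLastD_mem _ (by simp))
      rw [aget_aset_ne _ _ _ _ (by omega) (by omega) hvlast,
          aget_aset_ne _ _ _ _ (by omega) (by omega) hvq]
      have hold := hR v (List.mem_cons_of_mem _ hvS)
      have e1 : q :: (S1 ++ v :: w :: S2') = (q :: S1) ++ v :: (w :: S2') := by simp
      have hvqS1 : v ∉ q :: S1 := by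
        simp only [List.mem_cons]
        rintro (h | h)
        exacts [hvq h, hvS1 h]
      rw [e1, nextOf_decomp _ _ _ hvqS1] at hold
      rw [hold]
      have e2 : (S1 ++ v :: w :: S2') ++ [q] = S1 ++ v :: (w :: (S2' ++ [q])) := by simp
      rw [e2, nextOf_decomp _ _ _ hvS1]
      rfl
  · have hvq : v = q := by simpa using hvq
    subst hvq
    have hqlastS : v ≠ S.getLastD 0 := fun e => hqS (e ▸ hlastS)
    rw [aget_aset_ne _ _ _ _ (by omega) (by omega) hqlastS,
        aget_aset_self _ _ _ (by omega) hq1.2]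
    rw [nextOf_decomp _ _ _ hqS]
    rfl

theorem readout_spec (lst : List Int) : ∀ (R : List Int) (fuel : Nat),
    lst.Nodup → (∀ v ∈ lst, 1 ≤ v) → ptrOk R lst → lst.length ≤ fuel →
    readout fuel R (lst.headD 0) = lst := by
  induction lst with
  | nil =>
    intro R fuel _ _ _ _
    cases fuel <;> simp [readout]
  | cons a t ih =>
    intro R fuel hnd hpos hok hlen
    cases fuel with
    | zero => simp at hlen
    | succ f =>
      have ha1 : 1 ≤ a := hpos a List.mem_cons_self
      have hane : a ≠ 0 := by omega
      show readout (f + 1) R a = a :: t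
      rw [readout, if_neg hane]
      have hRa : aget R a = nextOf (a :: t) a := hok a List.mem_cons_self
      have hna : nextOf (a :: t) a = t.headD 0 := by simp [nextOf]
      congr 1
      rw [hRa, hna]
      exact ih R f (List.nodup_cons.mp hnd).2 (fun v hv => hpos v (List.mem_cons_of_mem _ hv))
        (fun v hv => by
          have hva : v ≠ a := fun e => (List.nodup_cons.mp hnd).1 (e ▸ hv)
          have := hok v (List.mem_cons_of_mem _ hv)
          rwa [show nextOf (a :: t) v = nextOf t v from by simp [nextOf, hva]] at this)
        (by simpa using Nat.le_of_succ_le_succ hlen)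

-- the build loop as structural recursion over adjacent pairs
def buildPairs : List Int → List Int × List Int → List Int × List Int
  | a :: b :: t, s => buildPairs (b :: t) (aset s.1 b a, aset s.2 a b)
  | _, s => s

theorem build_eq (A : List Int) : ∀ (pre suf : List Int) (s : List Int × List Int),
    A = pre ++ suf →
    (PySem.List.pyRange (pre.length : Int) ((A.length : Int) - 1) 1).foldl (buildStep A) s
      = buildPairs suf s := by
  intro pre suf
  induction suf generalizing pre with
  | nil =>
    intro s hA
    rw [PySem.List.pyRange_one_eq_nil (by simp only [hA, List.append_nil]; omega)]
    rfl
  | cons a t ih =>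
    intro s hA
    cases t with
    | nil =>
      rw [PySem.List.pyRange_one_eq_nil
        (by simp only [hA, List.length_append, List.length_cons, List.length_nil]; omega)]
      rfl
    | cons b t' =>
      have hlt : (pre.length : Int) < (A.length : Int) - 1 := by
        simp only [hA, List.length_append, List.length_cons]; omega
      rw [PySem.List.pyRange_one_cons hlt, List.foldl_cons]
      have g1 : PySem.List.pyGetD A ((pre.length : Nat) : Int) 0 = a := by
        rw [PySem.List.pyGetD_natCast, hA]
        simp [List.getD, List.getElem?_append_right (Nat.le_refl pre.length)]
      have g2 : PySem.List.pyGetD A ((pre.length : Int) + 1) 0 = b := by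
        have e : ((pre.length : Int) + 1) = (((pre.length + 1 : Nat)) : Int) := by push_cast; ring
        rw [e, PySem.List.pyGetD_natCast, hA]
        simp [List.getD, List.getElem?_append_right (by omega : pre.length ≤ pre.length + 1)]
      have hbs : buildStep A s ((pre.length : Nat) : Int) = (aset s.1 b a, aset s.2 a b) := by
        simp only [buildStep, g1, g2]
      rw [hbs]
      have hA' : A = (pre ++ [a]) ++ b :: t' := by simp [hA]
      have hrec := ih (pre ++ [a]) (aset s.1 b a, aset s.2 a b) hA'
      rw [show (((pre ++ [a]).length : Nat) : Int) = (pre.length : Int) + 1 from by simp] at hrec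
      rw [show buildPairs (a :: b :: t') s = buildPairs (b :: t') (aset s.1 b a, aset s.2 a b)
        from rfl]
      exact hrec

theorem buildPairs_len (X : List Int) : ∀ (s : List Int × List Int),
    (buildPairs X s).1.length = s.1.length ∧ (buildPairs X s).2.length = s.2.length := by
  induction X with
  | nil => intro s; simp [buildPairs]
  | cons a t ih =>
    intro s
    cases t with
    | nil => simp [buildPairs]
    | cons b t' =>
      have h := ih (aset s.1 b a, aset s.2 a b)
      simpa [buildPairs, length_aset] using h

theorem buildPairs_untouched_R (X : List Int) : ∀ (s : List Int × List Int) (u : Int),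
    1 ≤ u → (∀ v ∈ X, 1 ≤ v) → u ∉ X → aget (buildPairs X s).2 u = aget s.2 u := by
  induction X with
  | nil => intro s u _ _ _; simp [buildPairs]
  | cons a t ih =>
    intro s u hu hpos hmem
    cases t with
    | nil => simp [buildPairs]
    | cons b t' =>
      have hna : u ≠ a := fun e => hmem (e ▸ List.mem_cons_self)
      have ha1 : 1 ≤ a := hpos a List.mem_cons_self
      have h := ih (aset s.1 b a, aset s.2 a b) u hu
        (fun v hv => hpos v (List.mem_cons_of_mem _ hv))
        (fun h' => hmem (List.mem_cons_of_mem _ h'))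
      show aget (buildPairs (b :: t') (aset s.1 b a, aset s.2 a b)).2 u = aget s.2 u
      rw [h]
      exact aget_aset_ne _ _ _ _ (by omega) (by omega) hna

theorem buildPairs_untouched_L (X : List Int) : ∀ (s : List Int × List Int) (u : Int),
    1 ≤ u → (∀ v ∈ X, 1 ≤ v) → u ∉ X.tail → aget (buildPairs X s).1 u = aget s.1 u := by
  induction X with
  | nil => intro s u _ _ _; simp [buildPairs]
  | cons a t ih =>
    intro s u hu hpos hmem
    cases t with
    | nil => simp [buildPairs]
    | cons b t' =>
      simp only [List.tail_cons] at hmem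
      have hnb : u ≠ b := fun e => hmem (e ▸ List.mem_cons_self)
      have hb1 : 1 ≤ b := hpos b (List.mem_cons_of_mem _ List.mem_cons_self)
      have h := ih (aset s.1 b a, aset s.2 a b) u hu
        (fun v hv => hpos v (List.mem_cons_of_mem _ hv))
        (fun h' => hmem (List.mem_cons_of_mem _ h'))
      show aget (buildPairs (b :: t') (aset s.1 b a, aset s.2 a b)).1 u = aget s.1 u
      rw [h]
      exact aget_aset_ne _ _ _ _ (by omega) (by omega) hnb

theorem buildR_go (X : List Int) : ∀ (s : List Int × List Int),
    X.Nodup → (∀ v ∈ X, 1 ≤ v ∧ v.toNat < s.2.length) → (∀ v ∈ X, aget s.2 v = 0) →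
    ∀ v ∈ X, aget (buildPairs X s).2 v = nextOf X v := by
  induction X with
  | nil => intro s _ _ _ v hv; simp at hv
  | cons a t ih =>
    intro s hnd hrng hz v hv
    cases t with
    | nil =>
      have hva : v = a := by simpa using hv
      subst hva
      show aget s.2 v = nextOf [v] v
      rw [hz v hv]
      simp [nextOf]
    | cons b t' =>
      have ha1 : 1 ≤ a ∧ a.toNat < s.2.length := hrng a List.mem_cons_self
      have hb1 : 1 ≤ b := (hrng b (List.mem_cons_of_mem _ List.mem_cons_self)).1
      have hat : a ∉ b :: t' := (List.nodup_cons.mp hnd).1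
      show aget (buildPairs (b :: t') (aset s.1 b a, aset s.2 a b)).2 v = nextOf (a :: b :: t') v
      rcases List.mem_cons.mp hv with rfl | hvt
      · rw [buildPairs_untouched_R (b :: t') _ v ha1.1
          (fun u hu => (hrng u (List.mem_cons_of_mem _ hu)).1) hat]
        show aget (aset s.2 v b) v = _
        rw [aget_aset_self _ _ _ (by omega) ha1.2]
        simp [nextOf]
      · have hva : v ≠ a := fun e => hat (e ▸ hvt)
        have h := ih (aset s.1 b a, aset s.2 a b) (List.nodup_cons.mp hnd).2
          (fun u hu => by
            have := hrng u (List.mem_cons_of_mem _ hu)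
            simpa [length_aset] using this)
          (fun u hu => by
            have hu1 : 1 ≤ u := (hrng u (List.mem_cons_of_mem _ hu)).1
            have hua : u ≠ a := fun e => hat (e ▸ hu)
            show aget (aset s.2 a b) u = 0
            rw [aget_aset_ne _ _ _ _ (by omega) (by omega) hua]
            exact hz u (List.mem_cons_of_mem _ hu))
          v hvt
        rw [h]
        simp [nextOf, hva]

-- predecessor of v in (p :: suf), scanning with running previous element p
def prevGo : Int → List Int → Int → Int
  | p, b :: t, v => if v = b then p else prevGo b t v
  | _, [], _ => 0

theorem buildL_go (suf : List Int) : ∀ (p : Int) (s : List Int × List Int),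
    (p :: suf).Nodup → (∀ v ∈ p :: suf, 1 ≤ v ∧ v.toNat < s.1.length) →
    (∀ v ∈ suf, aget s.1 v = 0) →
    ∀ v ∈ suf, aget (buildPairs (p :: suf) s).1 v = prevGo p suf v := by
  induction suf with
  | nil => intro p s _ _ _ v hv; simp at hv
  | cons b t ih =>
    intro p s hnd hrng hz v hv
    have hb1 : 1 ≤ b ∧ b.toNat < s.1.length := hrng b (List.mem_cons_of_mem _ List.mem_cons_self)
    have hbt : b ∉ t := (List.nodup_cons.mp (List.nodup_cons.mp hnd).2).1
    show aget (buildPairs (b :: t) (aset s.1 b p, aset s.2 p b)).1 v = prevGo p (b :: t) v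
    rcases List.mem_cons.mp hv with rfl | hvt
    · rw [buildPairs_untouched_L (v :: t) _ v hb1.1
        (fun u hu => (hrng u (List.mem_cons_of_mem _ hu)).1) (by simpa using hbt)]
      show aget (aset s.1 v p) v = _
      rw [aget_aset_self _ _ _ (by omega) hb1.2]
      simp [prevGo]
    · have hvb : v ≠ b := fun e => hbt (e ▸ hvt)
      have h := ih b (aset s.1 b p, aset s.2 p b) (List.nodup_cons.mp hnd).2
        (fun u hu => by
          have := hrng u (List.mem_cons_of_mem _ hu)
          simpa [length_aset] using this)
        (fun u hu => by
          have hu1 : 1 ≤ u := (hrng u (List.mem_cons_of_mem _ (List.mem_cons_of_mem _ hu))).1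
          have hub : u ≠ b := fun e => hbt (e ▸ hu)
          show aget (aset s.1 b p) u = 0
          rw [aget_aset_ne _ _ _ _ (by omega) (by omega) hub]
          exact hz u (List.mem_cons_of_mem _ hu))
        v hvt
      rw [h]
      simp [prevGo, hvb]

theorem prevGo_eq (suf : List Int) : ∀ (p v : Int), (p :: suf).Nodup → v ∈ suf →
    prevGo p suf v = nextOf (p :: suf).reverse v := by
  induction suf with
  | nil => intro p v _ hv; simp at hv
  | cons b t ih =>
    intro p v hnd hv
    have hbt : b ∉ t := (List.nodup_cons.mp (List.nodup_cons.mp hnd).2).1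
    rcases List.mem_cons.mp hv with rfl | hvt
    · -- v = b
      have e : (p :: v :: t).reverse = t.reverse ++ v :: [p] := by simp
      rw [e, nextOf_decomp _ _ _ (by simpa using hbt)]
      simp [prevGo]
    · have hvb : v ≠ b := fun e => hbt (e ▸ hvt)
      have hih := ih b v (List.nodup_cons.mp hnd).2 hvt
      obtain ⟨t1, t2, rfl⟩ := List.append_of_mem hvt
      have hvt2 : v ∉ t2 :=
        (List.nodup_cons.mp ((List.nodup_cons.mp (List.nodup_cons.mp hnd).2).2.of_append_right)).1
      have hvt2r : v ∉ t2.reverse := by simpa using hvt2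
      have e1 : (b :: (t1 ++ v :: t2)).reverse = t2.reverse ++ v :: (t1.reverse ++ [b]) := by simp
      have e2 : (p :: b :: (t1 ++ v :: t2)).reverse
          = t2.reverse ++ v :: ((t1.reverse ++ [b]) ++ [p]) := by simp
      rw [e2, nextOf_decomp _ _ _ hvt2r, headD_append_left _ _ (by simp)]
      rw [e1, nextOf_decomp _ _ _ hvt2r] at hih
      rw [show prevGo p (b :: (t1 ++ v :: t2)) v = prevGo b (t1 ++ v :: t2) v from by
        simp [prevGo, hvb]]
      exact hih

theorem build_ptrOk (A0 : List Int) (s : List Int × List Int)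
    (hnd : A0.Nodup)
    (hrngR : ∀ v ∈ A0, 1 ≤ v ∧ v.toNat < s.2.length)
    (hrngL : ∀ v ∈ A0, 1 ≤ v ∧ v.toNat < s.1.length)
    (hz2 : ∀ v ∈ A0, aget s.2 v = 0) (hz1 : ∀ v ∈ A0, aget s.1 v = 0) :
    ptrOk (buildPairs A0 s).2 A0 ∧ ptrOk (buildPairs A0 s).1 A0.reverse := by
  constructor
  · exact fun v hv => buildR_go A0 s hnd hrngR hz2 v hv
  · cases A0 with
    | nil => intro v hv; simp at hv
    | cons a t =>
      intro v hv
      have hv' : v ∈ a :: t := List.mem_reverse.mp hv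
      have hat : a ∉ t := (List.nodup_cons.mp hnd).1
      rcases List.mem_cons.mp hv' with rfl | hvt
      · -- head: untouched, stays 0
        rw [buildPairs_untouched_L (v :: t) s v (hrngL v hv').1
            (fun u hu => (hrngL u hu).1) (by simpa using hat)]
        rw [hz1 v hv']
        have e : (v :: t).reverse = t.reverse ++ v :: [] := by simp
        rw [e, nextOf_decomp _ _ _ (by simpa using hat)]
        rfl
      · rw [buildL_go t a s hnd hrngL (fun u hu => hz1 u (List.mem_cons_of_mem _ hu)) v hvt]
        exact prevGo_eq t a v hnd hvt

theorem rotStep_eq (P S : List Int) (q : Int) (hqP : q ∉ P) :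
    rotStep (P ++ q :: S) q = S ++ q :: P := by
  have hidx : PySem.List.index? (P ++ q :: S) q = some P.length := by
    rw [PySem.List.index?_eq_some_iff]
    exact ⟨P, S, rfl, rfl, hqP⟩
  have e1 : PySem.List.slice (P ++ q :: S) (some ((P.length : Int) + 1)) none = S := by
    have e : ((P.length : Int) + 1) = (((P.length + 1 : Nat)) : Int) := by push_cast; ring
    rw [e, PySem.List.slice_from_natCast,
        show P ++ q :: S = (P ++ [q]) ++ S from by simp,
        show P.length + 1 = (P ++ [q]).length from by simp]
    exact List.drop_left
  have e2 : PySem.List.slice (P ++ q :: S) none (some ((P.length : Nat) : Int)) = P := by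
    rw [PySem.List.slice_to_natCast]
    exact List.take_left
  have e3 : PySem.List.pyGetD (P ++ q :: S) ((P.length : Nat) : Int) 0 = q := by
    rw [PySem.List.pyGetD_natCast]
    simp [List.getD, List.getElem?_append_right (Nat.le_refl P.length)]
  simp only [rotStep, hidx, e1, e2, e3]
  simp

theorem qstep_spec (L R lst : List Int) (q : Int)
    (hnd : lst.Nodup) (hlen2 : 2 ≤ lst.length)
    (hrngR : ∀ v ∈ lst, 1 ≤ v ∧ v.toNat < R.length)
    (hrngL : ∀ v ∈ lst, 1 ≤ v ∧ v.toNat < L.length)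
    (hR : ptrOk R lst) (hL : ptrOk L lst.reverse) (hq : q ∈ lst) :
    (qstep ((L, R), lst.headD 0, lst.getLastD 0) q).1.1.length = L.length ∧
    (qstep ((L, R), lst.headD 0, lst.getLastD 0) q).1.2.length = R.length ∧
    (qstep ((L, R), lst.headD 0, lst.getLastD 0) q).2.1 = (rotStep lst q).headD 0 ∧
    (qstep ((L, R), lst.headD 0, lst.getLastD 0) q).2.2 = (rotStep lst q).getLastD 0 ∧
    ptrOk (qstep ((L, R), lst.headD 0, lst.getLastD 0) q).1.2 (rotStep lst q) ∧
    ptrOk (qstep ((L, R), lst.headD 0, lst.getLastD 0) q).1.1 (rotStep lst q).reverse ∧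
    (rotStep lst q).Perm lst := by
  obtain ⟨P, S, hPS⟩ := List.append_of_mem hq
  subst hPS
  have hqP : q ∉ P := fun h => (List.disjoint_of_nodup_append hnd) h List.mem_cons_self
  have hqS : q ∉ S := (List.nodup_cons.mp hnd.of_append_right).1
  have hrot : rotStep (P ++ q :: S) q = S ++ q :: P := rotStep_eq P S q hqP
  rw [hrot]
  cases S with
  | nil =>
    have hP : P ≠ [] := by intro e; subst e; simp at hlen2
    have hlast : (P ++ [q]).getLastD 0 = q := by
      rw [getLastD_append_right _ _ (by simp)]; rfl
    have hhead : (P ++ [q]).headD 0 = P.headD 0 := headD_append_left _ _ hP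
    have hrevE : (P ++ [q]).reverse = q :: P.reverse := by simp
    have hl : aget L q = P.getLastD 0 := by
      have h := hL q (by simp)
      rw [hrevE] at h
      rw [h]
      simp only [nextOf, if_pos rfl]
      exact headD_rev P
    have hcond : q = (P ++ [q]).getLastD 0 := hlast.symm
    have hstep : qstep ((L, R), (P ++ [q]).headD 0, (P ++ [q]).getLastD 0) q
        = ((aset (aset L q 0) (P.headD 0) q,
            aset (aset R (P.getLastD 0) 0) q (P.headD 0)), q, P.getLastD 0) := by
      simp only [qstep]
      rw [if_pos hcond, hl, hhead]
    rw [hstep]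
    refine ⟨by simp [length_aset], by simp [length_aset], ?_, ?_, ?_, ?_, ?_⟩
    · rfl
    · rw [show (([] : List Int) ++ q :: P) = [q] ++ P from rfl,
          getLastD_append_right _ _ hP]
    · exact step_G1 R P q hP hnd hrngR hR
    · have hG := step_G2 L P.reverse q (by simpa using hP)
        (by rw [← hrevE]; exact List.nodup_reverse.mpr hnd)
        (fun v hv => hrngL v (by rw [← hrevE, List.mem_reverse] at hv; exact hv))
        (fun v hv => by rw [← hrevE] at hv ⊢; exact hL v hv)
      rw [getLastD_rev] at hG
      have e : (([] : List Int) ++ q :: P).reverse = P.reverse ++ [q] := by simp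
      rw [e]
      exact hG
    · have h1 : (P ++ [q]).Perm ([q] ++ P) := List.perm_append_comm
      simpa using h1.symm
  | cons s0 S' =>
    have hS : (s0 :: S') ≠ [] := by simp
    have hlastS : (P ++ q :: s0 :: S').getLastD 0 = (s0 :: S').getLastD 0 := by
      rw [getLastD_append_right _ _ (by simp),
          show (q :: s0 :: S') = [q] ++ s0 :: S' from rfl,
          getLastD_append_right _ _ (by simp)]
    have hqlast : q ≠ (P ++ q :: s0 :: S').getLastD 0 := by
      rw [hlastS]
      exact fun e => hqS (e ▸ getLastD_mem _ hS)
    cases P with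
    | nil =>
      have hheadE : (([] : List Int) ++ q :: s0 :: S').headD 0 = q := rfl
      have hr : aget R q = (s0 :: S').headD 0 := by
        have h := hR q (by simp)
        rw [h]
        simp [nextOf]
      have hrevE : (([] : List Int) ++ q :: s0 :: S').reverse
          = (s0 :: S').reverse ++ [q] := by simp
      have hstep : qstep ((L, R), (([] : List Int) ++ q :: s0 :: S').headD 0,
          (([] : List Int) ++ q :: s0 :: S').getLastD 0) q
          = ((aset (aset L ((s0 :: S').headD 0) 0) q ((s0 :: S').getLastD 0),
              aset (aset R q 0) ((s0 :: S').getLastD 0) q),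
             (s0 :: S').headD 0, q) := by
        simp only [qstep]
        rw [if_neg hqlast, if_pos hheadE.symm, hr, hlastS]
      rw [hstep]
      have hnd' : (q :: s0 :: S').Nodup := hnd
      refine ⟨by simp [length_aset], by simp [length_aset], ?_, ?_, ?_, ?_, ?_⟩
      · exact (headD_append_left _ _ hS).symm
      · rw [getLastD_append_right _ _ (by simp)]; rfl
      · exact step_G2 R (s0 :: S') q hS hnd' hrngR hR
      · have hG := step_G1 L (s0 :: S').reverse q (by simpa using hS)
          (by rw [← hrevE]; exact List.nodup_reverse.mpr hnd)
          (fun v hv => hrngL v (by rw [← hrevE, List.mem_reverse] at hv; exact hv))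
          (fun v hv => by rw [← hrevE] at hv ⊢; exact hL v hv)
        rw [getLastD_rev, headD_rev] at hG
        have e : ((s0 :: S') ++ q :: ([] : List Int)).reverse
            = q :: (s0 :: S').reverse := by simp
        rw [e]
        exact hG
      · have h1 : ((s0 :: S') ++ [q]).Perm ([q] ++ (s0 :: S')) := List.perm_append_comm
        simpa using h1
    | cons p0 P' =>
      have hP : (p0 :: P') ≠ [] := by simp
      have hheadE : ((p0 :: P') ++ q :: s0 :: S').headD 0 = (p0 :: P').headD 0 := rfl
      have hqhead : q ≠ ((p0 :: P') ++ q :: s0 :: S').headD 0 := by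
        rw [hheadE]
        exact fun e => hqP (e ▸ headD_mem _ hP)
      have hrevE : ((p0 :: P') ++ q :: s0 :: S').reverse
          = (s0 :: S').reverse ++ q :: (p0 :: P').reverse := by simp
      have hqSr : q ∉ (s0 :: S').reverse := by rw [List.mem_reverse]; exact hqS
      have hl : aget L q = (p0 :: P').getLastD 0 := by
        have h := hL q (by simp)
        rw [hrevE, nextOf_decomp _ _ _ hqSr] at h
        rw [h, headD_rev]
      have hr : aget R q = (s0 :: S').headD 0 := by
        have h := hR q (by simp)
        rw [nextOf_append_right _ _ _ hqP] at h
        rw [h]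
        simp [nextOf]
      have hstep : qstep ((L, R), ((p0 :: P') ++ q :: s0 :: S').headD 0,
          ((p0 :: P') ++ q :: s0 :: S').getLastD 0) q
          = ((aset (aset (aset L q ((s0 :: S').getLastD 0)) ((s0 :: S').headD 0) 0)
                ((p0 :: P').headD 0) q,
              aset (aset (aset R q ((p0 :: P').headD 0)) ((p0 :: P').getLastD 0) 0)
                ((s0 :: S').getLastD 0) q),
             (s0 :: S').headD 0, (p0 :: P').getLastD 0) := by
        simp only [qstep]
        rw [if_neg hqlast, if_neg hqhead, hl, hr, hlastS, hheadE]
      rw [hstep]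
      refine ⟨by simp [length_aset], by simp [length_aset], ?_, ?_, ?_, ?_, ?_⟩
      · exact (headD_append_left _ _ hS).symm
      · rw [getLastD_append_right _ _ (by simp),
            show (q :: p0 :: P') = [q] ++ p0 :: P' from rfl,
            getLastD_append_right _ _ hP]
      · exact step_G3 R (p0 :: P') (s0 :: S') q hP hS hnd hrngR hR
      · have hG := step_G3 L (s0 :: S').reverse (p0 :: P').reverse q
          (by simpa using hS) (by simpa using hP)
          (by rw [← hrevE]; exact List.nodup_reverse.mpr hnd)
          (fun v hv => hrngL v (by rw [← hrevE, List.mem_reverse] at hv; exact hv))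
          (fun v hv => by rw [← hrevE] at hv ⊢; exact hL v hv)
        rw [headD_rev, getLastD_rev, getLastD_rev] at hG
        have e : ((s0 :: S') ++ q :: (p0 :: P')).reverse
            = (p0 :: P').reverse ++ q :: (s0 :: S').reverse := by simp
        rw [e]
        exact hG
      · exact ((List.perm_middle (a := q) (l₁ := s0 :: S') (l₂ := p0 :: P')).trans
          ((List.perm_append_comm.cons q).trans
            (List.perm_middle (a := q) (l₁ := p0 :: P') (l₂ := s0 :: S')).symm))

theorem fold_spec (queries : List Int) : ∀ (L R lst : List Int),
    lst.Nodup → 2 ≤ lst.length →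
    (∀ v ∈ lst, 1 ≤ v ∧ v.toNat < R.length) → (∀ v ∈ lst, 1 ≤ v ∧ v.toNat < L.length) →
    lst.length ≤ R.length →
    ptrOk R lst → ptrOk L lst.reverse →
    (∀ q ∈ queries, q ∈ lst) →
    (readout (queries.foldl qstep ((L, R), lst.headD 0, lst.getLastD 0)).1.2.length
             (queries.foldl qstep ((L, R), lst.headD 0, lst.getLastD 0)).1.2
             (queries.foldl qstep ((L, R), lst.headD 0, lst.getLastD 0)).2.1)
      = queries.foldl rotStep lst := by
  induction queries with
  | nil =>
    intro L R lst hnd _ hrngR _ hfuel hR _ _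
    simp only [List.foldl_nil]
    exact readout_spec lst R R.length hnd (fun v hv => (hrngR v hv).1) hR hfuel
  | cons q qs ih =>
    intro L R lst hnd hlen2 hrngR hrngL hfuel hR hL hqs
    obtain ⟨h1, h2, h3, h4, h5, h6, h7⟩ :=
      qstep_spec L R lst q hnd hlen2 hrngR hrngL hR hL (hqs q List.mem_cons_self)
    simp only [List.foldl_cons]
    have est : qstep ((L, R), lst.headD 0, lst.getLastD 0) q
        = (((qstep ((L, R), lst.headD 0, lst.getLastD 0) q).1.1,
            (qstep ((L, R), lst.headD 0, lst.getLastD 0) q).1.2),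
           (rotStep lst q).headD 0, (rotStep lst q).getLastD 0) := by
      rw [← h3, ← h4]
    rw [est]
    exact ih _ _ (rotStep lst q)
      (h7.nodup_iff.mpr hnd)
      (by rw [h7.length_eq]; exact hlen2)
      (fun v hv => by rw [h2]; exact hrngR v (h7.mem_iff.mp hv))
      (fun v hv => by rw [h1]; exact hrngL v (h7.mem_iff.mp hv))
      (by rw [h2, h7.length_eq]; exact hfuel)
      h5 h6
      (fun q' hq' => h7.mem_iff.mpr (hqs q' (List.mem_cons_of_mem _ hq')))

theorem aget_replicate (n : Nat) (v : Int) : aget (List.replicate n 0) v = 0 := by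
  simp [aget, List.getD, List.getElem?_replicate]
  split <;> rfl

-- ===== VERDICT (by name: the statement is the Claim_ definition above) =====
theorem process_permutation_spec : Claim_equal_process_permutation := by
  intro N Q A queries hdom hpre
  show process_permutation N Q A queries = process_permutation_alt N Q A queries
  rcases hpre with h1 | ⟨hN2, hlenA, hndA, hrange, hqmem⟩
  · simp [process_permutation, process_permutation_alt, h1]
  · have hN1 : ¬ (N = 1) := by omega
    have hAne : A ≠ [] := by
      intro e
      rw [e] at hlenA
      simp at hlenA
      omega
    simp only [process_permutation, process_permutation_alt, if_neg hN1]
    have e0 : PySem.List.pyRange 0 (N - 1) 1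
        = PySem.List.pyRange ((([] : List Int).length : Nat) : Int) ((A.length : Int) - 1) 1 := by
      rw [hlenA]
      norm_num
    rw [e0, build_eq A [] A _ rfl]
    have hlen0 : (List.replicate (N + 1).toNat (0 : Int)).length = (N + 1).toNat := by simp
    have hBL := buildPairs_len A (List.replicate (N + 1).toNat 0, List.replicate (N + 1).toNat 0)
    have hrng2 : ∀ v ∈ A, 1 ≤ v ∧
        v.toNat < (buildPairs A (List.replicate (N + 1).toNat 0,
          List.replicate (N + 1).toNat 0)).2.length := by
      intro v hv
      have := hrange v hv
      rw [hBL.2, hlen0]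
      exact ⟨this.1, by omega⟩
    have hrng1 : ∀ v ∈ A, 1 ≤ v ∧
        v.toNat < (buildPairs A (List.replicate (N + 1).toNat 0,
          List.replicate (N + 1).toNat 0)).1.length := by
      intro v hv
      have := hrange v hv
      rw [hBL.1, hlen0]
      exact ⟨this.1, by omega⟩
    have hptr := build_ptrOk A (List.replicate (N + 1).toNat 0, List.replicate (N + 1).toNat 0)
      hndA (fun v hv => by rw [hlen0]; have := hrange v hv; exact ⟨this.1, by omega⟩)
      (fun v hv => by rw [hlen0]; have := hrange v hv; exact ⟨this.1, by omega⟩)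
      (fun v _ => aget_replicate _ _) (fun v _ => aget_replicate _ _)
    have hlm0 : PySem.List.pyGetD A 0 0 = A.headD 0 := by
      rw [PySem.List.pyGetD_zero]
      cases A with
      | nil => rfl
      | cons a t => rfl
    have hrm0 : PySem.List.pyGetD A (-1) 0 = A.getLastD 0 := by
      rw [PySem.List.pyGetD_neg_one A 0 hAne, List.getLastD_eq_getLast?,
        List.getLast?_eq_some_getLast hAne]
      rfl
    rw [hlm0, hrm0]
    exact fold_spec queries _ _ A hndA
      (by omega)
      hrng2 hrng1
      (by rw [hBL.2, hlen0]; omega)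
      hptr.1 hptr.2 hqmem
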